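-- pv_equiv track=rewrite | github.com/binSmile/python-training | tinkoff test/Tinkoff 4.py | solution
-- ===== SOURCE A (Python) =====
-- def solution(n,s):
--     td = {}
--     l = 0
--     for i in range(n):
--         td[s[i]] = td.setdefault(s[i], 0) + 1
--         sv = tuple(td.values())
--         ssv = tuple(set(sv))
--         if len(ssv) == 1:
--             l = max(i + 1, l)
--         elif (len(ssv) == 2):
--             ttd = {}
--             for j in sv:
--                 ttd[j] = ttd.setdefault(j, 0) + 1
--             ttd_val = ttd.values()
--             if (min(ttd_val) == 1):
--                 l = max(i + 1, l)
--     return l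
-- ===== SOURCE B (Python) =====
-- def solution(n, s):
--     # One pass: maintain char counts and a count-of-counts dict; O(1) check per step.
--     cnt = {}
--     coc = {}  # count value -> how many distinct chars currently have that count
--     l = 0
--     for i in range(n):
--         c = s[i]
--         old = cnt.get(c, 0)
--         cnt[c] = old + 1
--         if old:
--             coc[old] -= 1
--             if not coc[old]:
--                 del coc[old]
--         coc[old + 1] = coc.get(old + 1, 0) + 1
--         if len(coc) == 1:
--             l = i + 1
--         elif len(coc) == 2 and 1 in coc.values():
--             l = i + 1
--     return l
-- ===== Notes on version B (the rewrite author's own statement) =====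
-- stated objective: faster
-- what changed: A rebuilds the set of count-values and a counter over them from the whole dict on every character (O(distinct) per step); B incrementally maintains a count-of-counts dict alongside the char-count dict, so each step is an O(1) update and check.
import Mathlib
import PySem

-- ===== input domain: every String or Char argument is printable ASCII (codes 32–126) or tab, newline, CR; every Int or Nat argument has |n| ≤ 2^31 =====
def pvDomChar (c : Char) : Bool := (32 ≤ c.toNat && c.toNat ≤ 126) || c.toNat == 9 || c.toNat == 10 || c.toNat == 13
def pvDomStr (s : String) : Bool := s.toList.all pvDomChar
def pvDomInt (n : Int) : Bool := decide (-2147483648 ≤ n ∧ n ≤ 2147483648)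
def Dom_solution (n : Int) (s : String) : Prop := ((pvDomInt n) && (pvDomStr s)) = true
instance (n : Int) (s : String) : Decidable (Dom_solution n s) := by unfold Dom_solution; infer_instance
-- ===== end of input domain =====

-- B replaces A's per-step rebuild of the count-of-counts (O(distinct) work per character)
-- by an incrementally maintained count-of-counts dict with an O(1) check per step.

-- ===== PORT A =====
-- one iteration of A's loop body: state (td, l), index i, character c = s[i]
def stepA (tl : PySem.Dict Char Int × Int) (i : Int) (c : Char) : PySem.Dict Char Int × Int :=
  let v := tl.1.getD c 0                                  -- value of td.setdefault(s[i], 0)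
  let td := (tl.1.setdefault c 0).insert c (v + 1)        -- td[s[i]] = td.setdefault(s[i], 0) + 1
  let sv := td.values                                     -- sv = tuple(td.values())
  let ssv : PySem.Set Int := PySem.Set.ofList sv          -- ssv = tuple(set(sv))
  if ssv.length = 1 then (td, max (i + 1) tl.2)
  else if ssv.length = 2 then
    let ttd := sv.foldl (fun (d : PySem.Dict Int Int) j =>
      let w := d.getD j 0
      (d.setdefault j 0).insert j (w + 1)) PySem.Dict.empty
    if PySem.List.min? ttd.values (fun x => x) = some 1 then (td, max (i + 1) tl.2)
    else (td, tl.2)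
  else (td, tl.2)

-- the loop 'for i in range(n)'; none = IndexError from s[i] (excluded by Pre_)
def loopA (n : Int) (s : String) : Option (PySem.Dict Char Int × Int) :=
  (PySem.List.pyRange 0 n 1).foldl
    (fun st i => st.bind (fun tl => (PySem.Str.pyGet? s i).map (fun c => stepA tl i c)))
    (some (PySem.Dict.empty, 0))

def solution (n : Int) (s : String) : Int :=
  (loopA n s).elim 0 (fun tl => tl.2)

-- ===== PORT B =====
-- one iteration of B's loop body: state (cnt, coc, l), index i, character c = s[i]
def stepB (st : PySem.Dict Char Int × PySem.Dict Int Int × Int) (i : Int) (c : Char) :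
    PySem.Dict Char Int × PySem.Dict Int Int × Int :=
  let old := st.1.getD c 0                                -- old = cnt.get(c, 0)
  let cnt := st.1.insert c (old + 1)                      -- cnt[c] = old + 1
  let coc1 :=
    if old ≠ 0 then
      let d := st.2.1.modify old 0 (fun x => x - 1)       -- coc[old] -= 1 (key present whenever old ≠ 0)
      if d.getD old 0 = 0 then d.erase old else d          -- if not coc[old]: del coc[old]
    else st.2.1
  let coc := coc1.insert (old + 1) (coc1.getD (old + 1) 0 + 1)  -- coc[old+1] = coc.get(old+1, 0) + 1
  let l := if coc.size = 1 then i + 1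
           else if coc.size = 2 ∧ (1 : Int) ∈ coc.values then i + 1
           else st.2.2
  (cnt, coc, l)

def loopB (n : Int) (s : String) : Option (PySem.Dict Char Int × PySem.Dict Int Int × Int) :=
  (PySem.List.pyRange 0 n 1).foldl
    (fun st i => st.bind (fun t => (PySem.Str.pyGet? s i).map (fun c => stepB t i c)))
    (some (PySem.Dict.empty, PySem.Dict.empty, 0))

def solution_alt (n : Int) (s : String) : Int :=
  (loopB n s).elim 0 (fun t => t.2.2)

-- ===== PRECONDITION & SPEC =====
-- A indexes s[i] for i in range(n): it raises IndexError exactly when n > len(s); Pre_ excludes only those inputs.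
def Pre_solution (n : Int) (s : String) : Prop := n ≤ PySem.Str.len s
instance (n : Int) (s : String) : Decidable (Pre_solution n s) := by unfold Pre_solution; infer_instance

def pvWitness_solution : Int × String := (3, "aab")

def Spec_solution (n : Int) (s : String) (out : Int) : Prop := out = solution_alt n s
instance (n : Int) (s : String) (out : Int) : Decidable (Spec_solution n s out) := by unfold Spec_solution; infer_instance

-- ===== CLAIM (what is proved, stated in full; the proofs are below) =====
def Claim_equal_solution : Prop := ∀ (n : Int) (s : String), Dom_solution n s → Pre_solution n s → Spec_solution n s (solution n s)

-- ===== LEMMAS AND PROOFS =====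

-- the list of character counts of the processed prefix p (= td.values / cnt.values)
def SVals (p : List Char) : List Int := (PySem.Dict.counter p).values

-- B's count-of-counts update, as one function (stepB computes exactly this; stepB_eq below is rfl)
def cocStep (coc : PySem.Dict Int Int) (o : Int) : PySem.Dict Int Int :=
  let coc1 :=
    if o ≠ 0 then
      let d := coc.modify o 0 (fun x => x - 1)
      if d.getD o 0 = 0 then d.erase o else d
    else coc
  coc1.insert (o + 1) (coc1.getD (o + 1) 0 + 1)

lemma stepB_eq (cnt : PySem.Dict Char Int) (coc : PySem.Dict Int Int) (l i : Int) (c : Char) :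
    stepB (cnt, coc, l) i c =
      (cnt.insert c (cnt.getD c 0 + 1), cocStep coc (cnt.getD c 0),
       if (cocStep coc (cnt.getD c 0)).size = 1 then i + 1
       else if (cocStep coc (cnt.getD c 0)).size = 2 ∧ (1 : Int) ∈ (cocStep coc (cnt.getD c 0)).values then i + 1
       else l) := rfl

lemma SVals_eq (p : List Char) :
    SVals p = (PySem.Set.ofList p).map (fun ch => ((p.count ch : Nat) : Int)) := by
  simp [SVals, PySem.Dict.values, PySem.Dict.items_counter, List.map_map, Function.comp]

lemma counter_values_int (l : List Int) :
    (PySem.Dict.counter l).values = (PySem.Set.ofList l).map (fun k => ((l.count k : Nat) : Int)) := by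
  simp [PySem.Dict.values, PySem.Dict.items_counter, List.map_map, Function.comp]

-- invariant tying B's count-of-counts dict to the counts of the prefix p
def CInv (coc : PySem.Dict Int Int) (p : List Char) : Prop :=
  coc.keys.Nodup ∧ (∀ k : Int, k ∈ coc.keys ↔ k ∈ SVals p) ∧
    (∀ k : Int, coc.getD k 0 = (((SVals p).count k : Nat) : Int))

-- dict.erase facts (erase filters the items list)
lemma find?_filter_ne {ν : Type} (l : List (Int × ν)) (j k : Int) (h : j ≠ k) :
    (l.filter (fun p => !(p.1 == k))).find? (fun p => p.1 == j)
      = l.find? (fun p => p.1 == j) := by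
  induction l with
  | nil => rfl
  | cons a t ih =>
    by_cases hak : a.1 = k
    · rw [List.filter_cons, if_neg (by simp [hak]), ih,
        List.find?_cons_of_neg (by simp [hak]; omega)]
    · rw [List.filter_cons, if_pos (by simp [hak])]
      by_cases haj : a.1 = j
      · rw [List.find?_cons_of_pos (by simp [haj]), List.find?_cons_of_pos (by simp [haj])]
      · rw [List.find?_cons_of_neg (by simp [haj]), List.find?_cons_of_neg (by simp [haj]), ih]

lemma get?_erase {ν : Type} (d : PySem.Dict Int ν) (k j : Int) :
    (d.erase k).get? j = if j = k then none else d.get? j := by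
  rcases d with ⟨items⟩
  by_cases h : j = k
  · subst h
    simp only [PySem.Dict.erase, PySem.Dict.get?, if_pos rfl]
    rw [List.find?_eq_none.mpr]
    · rfl
    · intro p hp
      simp only [List.mem_filter] at hp
      simpa using hp.2
  · simp only [PySem.Dict.erase, PySem.Dict.get?, if_neg h]
    rw [find?_filter_ne _ _ _ h]

lemma getD_erase {ν : Type} (d : PySem.Dict Int ν) (k j : Int) (d0 : ν) :
    (d.erase k).getD j d0 = if j = k then d0 else d.getD j d0 := by
  simp only [PySem.Dict.getD, get?_erase]
  split <;> rfl

lemma keys_erase_sublist {ν : Type} (d : PySem.Dict Int ν) (k : Int) :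
    (d.erase k).keys.Sublist d.keys := by
  exact List.Sublist.map _ List.filter_sublist

lemma mem_keys_erase {ν : Type} (d : PySem.Dict Int ν) (k j : Int) :
    j ∈ (d.erase k).keys ↔ j ∈ d.keys ∧ j ≠ k := by
  rcases d with ⟨items⟩
  simp only [PySem.Dict.erase, PySem.Dict.keys, List.mem_map, List.mem_filter]
  constructor
  · rintro ⟨p, ⟨hp, hk⟩, rfl⟩
    exact ⟨⟨p, hp, rfl⟩, by simpa using hk⟩
  · rintro ⟨⟨p, hp, rfl⟩, hk⟩
    exact ⟨p, ⟨hp, by simpa using hk⟩, rfl⟩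

lemma size_eq_keys_length {κ ν : Type} (d : PySem.Dict κ ν) : d.size = d.keys.length := by
  simp [PySem.Dict.size, PySem.Dict.keys]

-- setdefault-then-overwrite is a plain overwrite
lemma setdefault_insert {κ ν : Type} [BEq κ] [LawfulBEq κ] (d : PySem.Dict κ ν) (k : κ) (v w : ν) :
    (d.setdefault k v).insert k w = d.insert k w := by
  by_cases h : d.contains k = true
  · rw [PySem.Dict.setdefault_of_contains _ _ h]
  · rw [PySem.Dict.setdefault_of_not_contains _ _ (by simpa using h),
        PySem.Dict.insert_insert_self]

lemma counter_append (p : List Char) (c : Char) :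
    PySem.Dict.counter (p ++ [c])
      = (PySem.Dict.counter p).insert c ((PySem.Dict.counter p).getD c 0 + 1) := by
  rw [PySem.Dict.counter_append_singleton]; rfl

lemma ofList_app_not (p : List Char) (c : Char) (h : c ∉ p) :
    PySem.Set.ofList (p ++ [c]) = PySem.Set.ofList p ++ [c] := by
  rw [PySem.Set.ofList_eq_foldl, List.foldl_append, ← PySem.Set.ofList_eq_foldl]
  simp only [List.foldl_cons, List.foldl_nil, PySem.Set.add]
  rw [if_neg]
  simp only [PySem.Set.contains, List.contains_iff_mem, PySem.Set.mem_ofList]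
  simpa using h

lemma ofList_app_mem (p : List Char) (c : Char) (h : c ∈ p) :
    PySem.Set.ofList (p ++ [c]) = PySem.Set.ofList p := by
  rw [PySem.Set.ofList_eq_foldl, List.foldl_append, ← PySem.Set.ofList_eq_foldl]
  simp only [List.foldl_cons, List.foldl_nil, PySem.Set.add]
  rw [if_pos]
  simp only [PySem.Set.contains, List.contains_iff_mem, PySem.Set.mem_ofList]
  simpa using h

-- one bumped value: counts of the two map images, stated additively (no Nat subtraction)
lemma count_map_update (l : List Char) (hnd : l.Nodup) (c : Char) (hc : c ∈ l)
    (f g : Char → Int) (hfg : ∀ x ∈ l, x ≠ c → g x = f x) (k : Int) :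
    (l.map g).count k + (if k = f c then 1 else 0)
      = (l.map f).count k + (if k = g c then 1 else 0) := by
  induction l with
  | nil => simp at hc
  | cons a t ih =>
    rcases List.mem_cons.mp hc with rfl | hct
    · have hteq : t.map g = t.map f := by
        apply List.map_congr_left
        intro x hx
        exact hfg x (List.mem_cons_of_mem _ hx) (fun h => (List.nodup_cons.mp hnd).1 (h ▸ hx))
      simp only [List.map_cons, List.count_cons, hteq, beq_iff_eq]
      split_ifs <;> omega
    · have hac : a ≠ c := fun h => (List.nodup_cons.mp hnd).1 (h ▸ hct)
      have hga : g a = f a := hfg a List.mem_cons_self hac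
      have := ih (List.nodup_cons.mp hnd).2 hct
        (fun x hx hxc => hfg x (List.mem_cons_of_mem _ hx) hxc)
      simp only [List.map_cons, List.count_cons, hga, beq_iff_eq]
      split_ifs at this ⊢ <;> omega

-- how the multiset of counts changes when one character is appended
lemma SVals_count_append (p : List Char) (c : Char) (k : Int) :
    (SVals (p ++ [c])).count k + (if k = ((p.count c : Nat) : Int) ∧ c ∈ p then 1 else 0)
      = (SVals p).count k + (if k = ((p.count c : Nat) : Int) + 1 then 1 else 0) := by
  by_cases hc : c ∈ p
  · have hgc : (((p ++ [c]).count c : Nat) : Int) = ((p.count c : Nat) : Int) + 1 := by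
      rw [List.count_append, List.count_singleton' c c, if_pos rfl]
      push_cast; ring
    have hmain := count_map_update (PySem.Set.ofList p) (PySem.Set.nodup_ofList p) c
      ((PySem.Set.mem_ofList p c).mpr hc)
      (fun ch => ((p.count ch : Nat) : Int))
      (fun ch => (((p ++ [c]).count ch : Nat) : Int))
      (fun x _ hxc => by
        simp [List.count_append, List.count_singleton', Ne.symm hxc]) k
    rw [SVals_eq, SVals_eq, ofList_app_mem p c hc]
    simp only [hgc] at hmain
    simpa [hc] using hmain
  · have h0 : p.count c = 0 := List.count_eq_zero.mpr hc
    have hmap : (PySem.Set.ofList p).map (fun ch => (((p ++ [c]).count ch : Nat) : Int))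
        = (PySem.Set.ofList p).map (fun ch => ((p.count ch : Nat) : Int)) := by
      apply List.map_congr_left
      intro x hx
      have hxc : x ≠ c := fun h => hc (h ▸ (PySem.Set.mem_ofList p x).mp hx)
      simp [List.count_append, List.count_singleton', Ne.symm hxc]
    have hgc : (((p ++ [c]).count c : Nat) : Int) = 1 := by
      rw [List.count_append, List.count_singleton' c c, if_pos rfl, h0]
      simp
    rw [SVals_eq, SVals_eq, ofList_app_not p c hc, List.map_append, List.map_cons,
      List.map_nil, hmap, hgc, List.count_append]
    simp only [h0, hc, and_false, if_false, Nat.cast_zero, zero_add, List.count_cons,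
      List.count_nil, beq_iff_eq]
    split_ifs <;> omega

-- the same count change, cast to Int
lemma SVals_count_append' (p : List Char) (c : Char) (k : Int) :
    (((SVals (p ++ [c])).count k : Nat) : Int) + (if k = ((p.count c : Nat) : Int) ∧ c ∈ p then 1 else 0)
      = (((SVals p).count k : Nat) : Int) + (if k = ((p.count c : Nat) : Int) + 1 then 1 else 0) := by
  have h := SVals_count_append p c k
  split_ifs at h ⊢ <;> omega

lemma mem_SVals_iff (p : List Char) (k : Int) : k ∈ SVals p ↔ 0 < (SVals p).count k :=
  List.count_pos_iff.symm

-- derived facts from the invariant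
lemma CInv_keys_perm (coc : PySem.Dict Int Int) (p : List Char) (h : CInv coc p) :
    coc.keys.Perm (PySem.Set.ofList (SVals p)) := by
  refine (List.perm_ext_iff_of_nodup h.1 (PySem.Set.nodup_ofList _)).mpr ?_
  intro a
  rw [PySem.Set.mem_ofList]
  exact h.2.1 a

lemma CInv_size (coc : PySem.Dict Int Int) (p : List Char) (h : CInv coc p) :
    coc.size = (PySem.Set.ofList (SVals p)).length := by
  rw [size_eq_keys_length, (CInv_keys_perm coc p h).length_eq]

lemma CInv_values_perm (coc : PySem.Dict Int Int) (p : List Char) (h : CInv coc p) :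
    coc.values.Perm ((PySem.Set.ofList (SVals p)).map
      (fun k => (((SVals p).count k : Nat) : Int))) := by
  rw [PySem.Dict.values_eq_map_keys coc h.1 0]
  have : coc.keys.map (fun k => coc.getD k 0)
      = coc.keys.map (fun k => (((SVals p).count k : Nat) : Int)) :=
    List.map_congr_left (fun k _ => h.2.2 k)
  rw [this]
  exact (CInv_keys_perm coc p h).map _

-- the invariant is preserved by B's count-of-counts update
lemma CInv_step (coc : PySem.Dict Int Int) (p : List Char) (c : Char) (h : CInv coc p) :
    CInv (cocStep coc ((p.count c : Nat) : Int)) (p ++ [c]) := by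
  obtain ⟨h1, h2, h3⟩ := h
  by_cases hc : c ∈ p
  · have hpos : 0 < p.count c := List.count_pos_iff.mpr hc
    set o : Int := ((p.count c : Nat) : Int) with ho
    have ho0 : o ≠ 0 := by rw [ho]; omega
    have hoS : o ∈ SVals p := by
      rw [SVals_eq]; exact List.mem_map.mpr ⟨c, (PySem.Set.mem_ofList p c).mpr hc, rfl⟩
    have hSpos : 0 < (SVals p).count o := List.count_pos_iff.mpr hoS
    have hq : ∀ k : Int, (((SVals (p ++ [c])).count k : Nat) : Int) + (if k = o then 1 else 0)
        = (((SVals p).count k : Nat) : Int) + (if k = o + 1 then 1 else 0) := by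
      intro k
      have := SVals_count_append' p c k
      simpa [← ho, hc] using this
    unfold cocStep
    rw [if_pos ho0]
    set d := coc.modify o 0 (fun x => x - 1) with hd
    have hdk : ∀ k : Int, d.getD k 0
        = if k = o then (((SVals p).count o : Nat) : Int) - 1 else (((SVals p).count k : Nat) : Int) := by
      intro k
      rw [hd, PySem.Dict.getD_modify]
      split_ifs
      · rw [h3 o]
      · rw [h3 k]
    have hdnd : d.keys.Nodup := by
      rw [hd]; simp only [PySem.Dict.modify]; exact PySem.Dict.nodup_keys_insert _ _ _ h1
    have hdm : ∀ k : Int, k ∈ d.keys ↔ k = o ∨ k ∈ coc.keys := by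
      intro k
      rw [hd]; simp only [PySem.Dict.modify]; exact PySem.Dict.mem_keys_insert _ _ _ _
    by_cases h1c : (SVals p).count o = 1
    · have hd0 : d.getD o 0 = 0 := by rw [hdk o, if_pos rfl, h1c]; simp
      rw [if_pos hd0]
      have hnd2 : (d.erase o).keys.Nodup := (keys_erase_sublist d o).nodup hdnd
      refine ⟨PySem.Dict.nodup_keys_insert _ _ _ hnd2, ?_, ?_⟩
      · intro k
        simp only [PySem.Dict.mem_keys_insert, mem_keys_erase, hdm k, h2 k, mem_SVals_iff]
        have hck := hq k
        by_cases hk2 : k = o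
        · subst hk2
          rw [if_pos rfl, if_neg (by omega)] at hck
          omega
        · by_cases hk1 : k = o + 1
          · subst hk1
            rw [if_neg (by omega), if_pos rfl] at hck
            omega
          · rw [if_neg hk2, if_neg hk1] at hck
            omega
      · intro k
        by_cases hk1 : k = o + 1
        · subst hk1
          rw [PySem.Dict.getD_insert, if_pos rfl, getD_erase, if_neg (by omega),
            hdk _, if_neg (by omega)]
          have := hq (o + 1)
          rw [if_neg (by omega : ¬(o + 1 = o)), if_pos rfl] at this
          omega
        · by_cases hk2 : k = o
          · subst hk2
            rw [PySem.Dict.getD_insert, if_neg (by omega), getD_erase, if_pos rfl]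
            have := hq o
            rw [if_pos rfl, if_neg (by omega)] at this
            omega
          · rw [PySem.Dict.getD_insert, if_neg hk1, getD_erase, if_neg hk2, hdk _, if_neg hk2]
            have := hq k
            rw [if_neg hk2, if_neg hk1] at this
            omega
    · have hd0 : ¬ d.getD o 0 = 0 := by rw [hdk o, if_pos rfl]; omega
      rw [if_neg hd0]
      refine ⟨PySem.Dict.nodup_keys_insert _ _ _ hdnd, ?_, ?_⟩
      · intro k
        simp only [PySem.Dict.mem_keys_insert, hdm k, h2 k, mem_SVals_iff]
        have hck := hq k
        by_cases hk2 : k = o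
        · subst hk2
          rw [if_pos rfl, if_neg (by omega)] at hck
          omega
        · by_cases hk1 : k = o + 1
          · subst hk1
            rw [if_neg (by omega), if_pos rfl] at hck
            omega
          · rw [if_neg hk2, if_neg hk1] at hck
            omega
      · intro k
        by_cases hk1 : k = o + 1
        · subst hk1
          rw [PySem.Dict.getD_insert, if_pos rfl, hdk _, if_neg (by omega)]
          have := hq (o + 1)
          rw [if_neg (by omega : ¬(o + 1 = o)), if_pos rfl] at this
          omega
        · by_cases hk2 : k = o
          · subst hk2
            rw [PySem.Dict.getD_insert, if_neg (by omega), hdk _, if_pos rfl]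
            have := hq o
            rw [if_pos rfl, if_neg (by omega)] at this
            omega
          · rw [PySem.Dict.getD_insert, if_neg hk1, hdk _, if_neg hk2]
            have := hq k
            rw [if_neg hk2, if_neg hk1] at this
            omega
  · have h0 : ((p.count c : Nat) : Int) = 0 := by rw [List.count_eq_zero.mpr hc]; simp
    have hq : ∀ k : Int, (((SVals (p ++ [c])).count k : Nat) : Int)
        = (((SVals p).count k : Nat) : Int) + (if k = 1 then 1 else 0) := by
      intro k
      have := SVals_count_append' p c k
      rw [h0] at this
      simpa [hc] using this
    unfold cocStep
    rw [h0, if_neg (by simp)]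
    refine ⟨PySem.Dict.nodup_keys_insert _ _ _ h1, ?_, ?_⟩
    · intro k
      simp only [PySem.Dict.mem_keys_insert, h2 k, mem_SVals_iff, zero_add]
      have hck := hq k
      by_cases hk1 : k = 1
      · subst hk1
        rw [if_pos rfl] at hck
        omega
      · rw [if_neg hk1] at hck
        omega
    · intro k
      by_cases hk1 : k = 1
      · subst hk1
        rw [show (0 : Int) + 1 = 1 by ring, PySem.Dict.getD_insert, if_pos rfl, h3 1]
        have := hq 1
        rw [if_pos rfl] at this
        omega
      · rw [show (0 : Int) + 1 = 1 by ring, PySem.Dict.getD_insert, if_neg hk1, h3 k]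
        have := hq k
        rw [if_neg hk1] at this
        omega

-- the two step functions produce the same td/cnt and the same l
lemma min?_pair (a b : Int) (ha : 1 ≤ a) (hb : 1 ≤ b) :
    (PySem.List.min? [a, b] (fun x => x) = some 1) ↔ ((1 : Int) ∈ [a, b]) := by
  simp only [PySem.List.min?, List.foldl, List.mem_cons, List.mem_singleton,
    List.not_mem_nil, or_false]
  split_ifs <;> simp <;> omega

lemma counter_foldl_eq (L : List Int) :
    L.foldl (fun (d : PySem.Dict Int Int) j => (d.setdefault j 0).insert j (d.getD j 0 + 1))
      PySem.Dict.empty = PySem.Dict.counter L := by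
  have hfun : (fun (d : PySem.Dict Int Int) j => (d.setdefault j 0).insert j (d.getD j 0 + 1))
      = fun (d : PySem.Dict Int Int) j => d.insert j (d.getD j 0 + 1) := by
    funext d j
    rw [setdefault_insert]
  rw [hfun, PySem.Dict.foldl_insert_getD_add_one_eq_counter]

lemma values_counter_pos (L : List Int) :
    ∀ x ∈ (PySem.Dict.counter L).values, 1 ≤ x := by
  rw [counter_values_int]
  intro x hx
  obtain ⟨k, hk, rfl⟩ := List.mem_map.mp hx
  have : k ∈ L := (PySem.Set.mem_ofList L k).mp hk
  have : 0 < L.count k := List.count_pos_iff.mpr this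
  omega

lemma step_agree (p : List Char) (c : Char) (coc : PySem.Dict Int Int) (l i : Int)
    (h : CInv coc p) (hl : l ≤ i) :
    ∃ l' coc',
      stepA (PySem.Dict.counter p, l) i c = (PySem.Dict.counter (p ++ [c]), l') ∧
      stepB (PySem.Dict.counter p, coc, l) i c = (PySem.Dict.counter (p ++ [c]), coc', l') ∧
      CInv coc' (p ++ [c]) ∧ l' ≤ i + 1 := by
  have hinv' : CInv (cocStep coc ((PySem.Dict.counter p).getD c 0)) (p ++ [c]) := by
    rw [PySem.Dict.getD_counter]
    exact CInv_step coc p c h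
  set coc' := cocStep coc ((PySem.Dict.counter p).getD c 0) with hcoc'
  set q := p ++ [c] with hqdef
  refine ⟨if coc'.size = 1 then i + 1
          else if coc'.size = 2 ∧ (1 : Int) ∈ coc'.values then i + 1 else l,
          coc', ?_, ?_, hinv', by split_ifs <;> omega⟩
  · -- stepA
    have htd : ((PySem.Dict.counter p).setdefault c 0).insert c ((PySem.Dict.counter p).getD c 0 + 1)
        = PySem.Dict.counter q := by rw [setdefault_insert, ← counter_append]
    have hsz : coc'.size = (PySem.Set.ofList ((PySem.Dict.counter q).values)).length :=
      CInv_size _ _ hinv'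
    have hperm := CInv_values_perm _ _ hinv'
    have hmem1 : ((1 : Int) ∈ coc'.values) ↔ (1 : Int) ∈ (PySem.Dict.counter ((PySem.Dict.counter q).values)).values := by
      rw [counter_values_int]
      exact hperm.mem_iff
    dsimp only [stepA]
    rw [htd, counter_foldl_eq, hsz]
    by_cases e1 : (PySem.Set.ofList ((PySem.Dict.counter q).values)).length = 1
    · rw [if_pos e1, if_pos e1, max_eq_left (by omega)]
    · rw [if_neg e1, if_neg e1]
      by_cases e2 : (PySem.Set.ofList ((PySem.Dict.counter q).values)).length = 2
      · rw [if_pos e2]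
        have hlenv : ((PySem.Dict.counter ((PySem.Dict.counter q).values)).values).length = 2 := by
          rw [counter_values_int, List.length_map]
          exact e2
        obtain ⟨a, b, hab⟩ := List.length_eq_two.mp hlenv
        have hpos := values_counter_pos ((PySem.Dict.counter q).values)
        have ha : 1 ≤ a := hpos a (by rw [hab]; exact List.mem_cons_self)
        have hb : 1 ≤ b := hpos b (by rw [hab]; simp)
        have hminiff : (PySem.List.min? ((PySem.Dict.counter ((PySem.Dict.counter q).values)).values) (fun x => x) = some 1)
            ↔ ((1 : Int) ∈ coc'.values) := by
          rw [hab, min?_pair a b ha hb, hmem1, hab]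
        by_cases e3 : (1 : Int) ∈ coc'.values
        · rw [if_pos (hminiff.mpr e3), if_pos ⟨e2, e3⟩, max_eq_left (by omega)]
        · rw [if_neg (fun hmin => e3 (hminiff.mp hmin)), if_neg (by
            rintro ⟨-, h3'⟩; exact e3 h3')]
      · rw [if_neg e2, if_neg (by rintro ⟨h2', -⟩; exact e2 h2')]
  · -- stepB
    rw [stepB_eq, ← hcoc', ← counter_append]

lemma pyRange_nonpos (n : Int) (hn : n ≤ 0) : PySem.List.pyRange 0 n 1 = [] := by
  rw [List.eq_nil_iff_forall_not_mem]
  intro x hx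
  rw [PySem.List.mem_pyRange_one] at hx
  omega

lemma CInv_empty : CInv PySem.Dict.empty [] := by
  refine ⟨by simp [PySem.Dict.empty, PySem.Dict.keys], ?_, ?_⟩ <;>
    simp [PySem.Dict.empty, PySem.Dict.keys, PySem.Dict.getD, PySem.Dict.get?, SVals,
      PySem.Dict.counter, PySem.Dict.values]

lemma loop_inv (s : String) (m : Nat) (hm : m ≤ s.toList.length) :
    ∃ (l : Int) (coc : PySem.Dict Int Int),
      loopA (m : Int) s = some (PySem.Dict.counter (s.toList.take m), l) ∧
      loopB (m : Int) s = some (PySem.Dict.counter (s.toList.take m), coc, l) ∧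
      CInv coc (s.toList.take m) ∧ l ≤ (m : Int) := by
  induction m with
  | zero =>
    refine ⟨0, PySem.Dict.empty, ?_, ?_, by simpa using CInv_empty, le_refl 0⟩ <;>
      simp [loopA, loopB, pyRange_nonpos 0 le_rfl, PySem.Dict.counter]
  | succ m ih =>
    obtain ⟨l, coc, hA, hB, hinv, hl⟩ := ih (Nat.le_of_succ_le hm)
    have hmlen : m < s.toList.length := hm
    have hrange : PySem.List.pyRange 0 ((m + 1 : Nat) : Int) 1
        = PySem.List.pyRange 0 (m : Int) 1 ++ [(m : Int)] := by
      push_cast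
      exact PySem.List.pyRange_one_succ_right (by positivity)
    have hget : PySem.Str.pyGet? s ((m : Nat) : Int) = some (s.toList[m]'hmlen) := by
      rw [PySem.Str.pyGet?_natCast, List.getElem?_eq_getElem hmlen]
    have htake : s.toList.take (m + 1) = s.toList.take m ++ [s.toList[m]'hmlen] := by
      rw [List.take_succ, List.getElem?_eq_getElem hmlen]; rfl
    obtain ⟨l', coc', hsA, hsB, hinv', hl'⟩ :=
      step_agree (s.toList.take m) (s.toList[m]'hmlen) coc l (m : Int) hinv hl
    refine ⟨l', coc', ?_, ?_, by rwa [htake], by push_cast; exact hl'⟩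
    · unfold loopA at hA ⊢
      rw [hrange, List.foldl_append, hA]
      simp only [List.foldl_cons, List.foldl_nil, Option.bind_some, hget, Option.map_some]
      rw [hsA, htake]
    · unfold loopB at hB ⊢
      rw [hrange, List.foldl_append, hB]
      simp only [List.foldl_cons, List.foldl_nil, Option.bind_some, hget, Option.map_some]
      rw [hsB, htake]

-- ===== VERDICT (by name: the statement is the Claim_ definition above) =====
theorem solution_spec : Claim_equal_solution := by
  intro n s _ hpre
  unfold Spec_solution
  unfold Pre_solution at hpre
  by_cases hn : n ≤ 0
  · simp [solution, solution_alt, loopA, loopB, pyRange_nonpos n hn]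
  · push_neg at hn
    have hn' : n = ((n.toNat : Nat) : Int) := by omega
    have hlen : n.toNat ≤ s.toList.length := by
      have := hpre
      rw [PySem.Str.len_eq] at this
      omega
    obtain ⟨l, coc, hA, hB, -, -⟩ := loop_inv s n.toNat hlen
    have hcast : ((n.toNat : Nat) : Int) = n := by omega
    rw [hcast] at hA hB
    simp [solution, solution_alt, hA, hB]
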